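-- pv_equiv track=rewrite | github.com/krloer/CTF | 2023/patriotCTF/rev/garbage/solve.py | rev_finalstage
-- ===== SOURCE A (Python) =====
-- def rev_finalstage(r):
--     flag = ""
--     i = 0
--     while i < len(r):
--         try:
--             flag += r[i+1] + r[i]
--         except:
--             flag += r[i]
--         i+=2
--
--     flag = list(flag)
--     flag.reverse()
--     flag = "".join(g for g in flag)
--     return flag
-- ===== SOURCE B (Python) =====
-- def rev_finalstage(r):
--     blocks = [r[i:i + 2] for i in range(0, len(r), 2)]
--     return "".join(reversed(blocks))
-- ===== Notes on version B (the rewrite author's own statement) =====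
-- stated objective: faster
-- what changed: A swaps each adjacent character pair while building the string by repeated += concatenation and then reverses it character by character; B never swaps characters: it chops the string into 2-character blocks in one comprehension and joins the blocks in reverse block order in a single join.
import Mathlib
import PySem

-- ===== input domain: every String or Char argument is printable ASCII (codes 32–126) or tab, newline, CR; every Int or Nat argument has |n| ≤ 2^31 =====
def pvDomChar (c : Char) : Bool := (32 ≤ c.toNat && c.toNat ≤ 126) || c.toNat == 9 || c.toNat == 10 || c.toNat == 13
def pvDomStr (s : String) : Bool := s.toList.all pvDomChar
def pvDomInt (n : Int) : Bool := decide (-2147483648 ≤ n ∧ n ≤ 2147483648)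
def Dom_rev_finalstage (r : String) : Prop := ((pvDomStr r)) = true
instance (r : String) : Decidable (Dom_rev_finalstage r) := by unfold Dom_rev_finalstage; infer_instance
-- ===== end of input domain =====

-- B replaces A's swap-each-pair-then-reverse (built by repeated string +=) with chopping into
-- 2-character blocks joined once in reverse block order (measured faster in a timing run).


-- ===== PORT A =====
-- the while loop with step 2: try takes r[i+1]+r[i], the except branch (i+1 out of range)
-- takes the lone r[i]; ported as the obvious two-at-a-time structural recursion
def pvSwapGo : List Char → List Char
  | [] => []
  | [a] => [a]
  | a :: b :: t => b :: a :: pvSwapGo t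

def rev_finalstage (r : String) : String :=
  -- flag = list(flag); flag.reverse(); "".join(...)
  String.ofList ((pvSwapGo r.toList).reverse)

-- ===== PORT B =====
def rev_finalstage_alt (r : String) : String :=
  -- blocks = [r[i:i+2] for i in range(0, len(r), 2)]
  let blocks := (PySem.List.pyRange 0 (PySem.Str.len r) 2).map
    (fun i => PySem.List.slice r.toList (some i) (some (i + 2)))
  -- "".join(reversed(blocks))
  String.ofList blocks.reverse.flatten

-- ===== PRECONDITION & SPEC =====
def Spec_rev_finalstage (r : String) (out : String) : Prop := out = rev_finalstage_alt r
instance (r : String) (out : String) : Decidable (Spec_rev_finalstage r out) := by unfold Spec_rev_finalstage; infer_instance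

-- ===== CLAIM (what is proved, stated in full; the proofs are below) =====
def Claim_equal_rev_finalstage : Prop := ∀ (r : String), Dom_rev_finalstage r → Spec_rev_finalstage r (rev_finalstage r)

-- ===== LEMMAS AND PROOFS =====

-- the 2-blocks of a list, by structural recursion (proof-only helper)
def pvChunks : List Char → List (List Char)
  | [] => []
  | [a] => [[a]]
  | a :: b :: t => [a, b] :: pvChunks t

lemma pv_blocks_eq_chunks (l : List Char) :
    (List.range ((l.length + 1) / 2)).map (fun k => (l.drop (2 * k)).take 2) = pvChunks l := by
  induction l using pvSwapGo.induct with
  | case1 => simp [pvChunks]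
  | case2 a => simp [pvChunks]
  | case3 a b t ih =>
    have hlen : ((a :: b :: t).length + 1) / 2 = (t.length + 1) / 2 + 1 := by
      simp; omega
    rw [hlen, List.range_succ_eq_map, pvChunks]
    simp only [List.map_cons, List.map_map]
    refine List.cons_eq_cons.mpr ⟨by simp, ?_⟩
    rw [← ih]
    apply List.map_congr_left
    intro k _
    have h2 : 2 * Nat.succ k = 2 * k + 2 := by omega
    simp [Function.comp, h2, List.drop_succ_cons]

lemma pv_chunks_rev_flatten (l : List Char) :
    (pvChunks l).reverse.flatten = (pvSwapGo l).reverse := by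
  induction l using pvSwapGo.induct with
  | case1 => simp [pvChunks, pvSwapGo]
  | case2 a => simp [pvChunks, pvSwapGo]
  | case3 a b t ih => simp [pvChunks, pvSwapGo, ih]

lemma pv_range_two (n : Nat) :
    PySem.List.pyRange 0 (n : Int) 2 = (List.range ((n + 1) / 2)).map (fun k => ((2 * k : Nat) : Int)) := by
  rw [PySem.List.pyRange_of_pos 0 (n : Int) (by norm_num)]
  by_cases h : 0 < n
  · have hif : (0 : Int) < (n : Int) := by exact_mod_cast h
    rw [if_pos hif]
    have hcount : (((n : Int) - 0 + 2 - 1) / 2).toNat = (n + 1) / 2 := by omega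
    rw [hcount]
    apply List.map_congr_left
    intro k _
    push_cast
    ring
  · have h0 : n = 0 := by omega
    subst h0
    simp

lemma pv_slice_two (l : List Char) (k : Nat) :
    PySem.List.slice l (some ((2 * k : Nat) : Int)) (some (((2 * k : Nat) : Int) + 2)) =
      (l.drop (2 * k)).take 2 := by
  have : (((2 * k : Nat) : Int) + 2) = ((2 * k + 2 : Nat) : Int) := by push_cast; ring
  rw [this, PySem.List.slice_natCast]
  congr 1
  omega

-- ===== VERDICT (by name: the statement is the Claim_ definition above) =====
theorem rev_finalstage_spec : Claim_equal_rev_finalstage := by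
  intro r _
  unfold Spec_rev_finalstage rev_finalstage rev_finalstage_alt
  rw [PySem.Str.len_eq, pv_range_two, List.map_map]
  have hmap : (List.range ((r.toList.length + 1) / 2)).map
      ((fun i => PySem.List.slice r.toList (some i) (some (i + 2))) ∘ fun k => ((2 * k : Nat) : Int)) =
      (List.range ((r.toList.length + 1) / 2)).map (fun k => ((r.toList.drop (2 * k)).take 2)) := by
    apply List.map_congr_left
    intro k _
    exact pv_slice_two r.toList k
  rw [hmap, pv_blocks_eq_chunks]
  show _ = String.ofList (pvChunks r.toList).reverse.flatten
  rw [pv_chunks_rev_flatten]
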